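-- pv_equiv track=rewrite | github.com/QSuHack/lesson_files_python | ulubione_liczby_i_lewy_szczyt.py | szukaj_parzystej
-- ===== SOURCE A (Python) =====
-- def szukaj_parzystej(stos_liczb):
--     """
--     Ulubione liczby
--     Jaś i Małgosia.
--     Liczby najpierw nieparzyste, potem parzyste, nieznana ilość poszczególnych
--     szukamy pierwszej parzystej w złożoności lepszej niż liniowa (log n)
--     """
--     n = len(stos_liczb)
--     a, b = 1, n - 1
--
--     while b - a > 1:
--         s = (a + b) // 2
--         if stos_liczb[s] % 2 == 0:
--             b = s
--         else:
--             a = s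
--     return stos_liczb[b]
-- ===== SOURCE B (Python) =====
-- def szukaj_parzystej(stos_liczb):
--     def idx(a, g):
--         # returns the index A's loop ends at, carrying (left bound, gap) instead of (left, right)
--         if g <= 1:
--             return a + g
--         h = g // 2
--         if stos_liczb[a + h] % 2 == 0:
--             return idx(a, h)
--         return idx(a + h, g - h)
--     return stos_liczb[idx(1, len(stos_liczb) - 2)]
-- ===== Notes on version B (the rewrite author's own statement) =====
-- stated objective: alternative
-- what changed: A's iterative binary search over the two mutable bounds (a, b) is replaced by a recursive helper over (left bound, gap) that halves the gap, returns the final index from its base case, and indexes the list once outside the recursion.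
import Mathlib
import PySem

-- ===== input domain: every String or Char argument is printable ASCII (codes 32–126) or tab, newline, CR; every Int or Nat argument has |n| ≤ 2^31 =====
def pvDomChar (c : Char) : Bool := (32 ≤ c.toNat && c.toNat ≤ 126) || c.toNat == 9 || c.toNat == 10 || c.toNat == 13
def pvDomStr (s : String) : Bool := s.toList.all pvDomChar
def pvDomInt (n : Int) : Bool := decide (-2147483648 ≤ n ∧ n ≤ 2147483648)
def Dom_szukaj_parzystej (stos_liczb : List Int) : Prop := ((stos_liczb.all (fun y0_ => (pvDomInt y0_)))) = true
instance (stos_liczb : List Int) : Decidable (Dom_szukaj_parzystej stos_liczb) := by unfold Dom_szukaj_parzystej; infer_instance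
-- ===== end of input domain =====

-- B reformulates A's two-bound (a, b) while-loop as a recursive index search over
-- (left bound, gap) that halves the gap and indexes the list once at the end;
-- objective: alternative decomposition, same O(log n) cost.

-- ===== PORT A =====
-- Port of A's while-loop on the bound pair (a, b); the list indexing uses pyGet?
-- with default 0 — under Pre_ (nonempty list) every index A touches is in range.
def szukaj_parzystej_loop (xs : List Int) (a b : Int) : Int × Int :=
  if b - a > 1 then
    let s := PySem.Int.floordiv (a + b) 2
    if PySem.Int.mod ((PySem.List.pyGet? xs s).getD 0) 2 == 0 then
      szukaj_parzystej_loop xs a s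
    else
      szukaj_parzystej_loop xs s b
  else
    (a, b)
termination_by (b - a).toNat
decreasing_by
  · have h := PySem.Int.floordiv_two_mid_bounds (lo := a) (hi := b) (by omega)
    have := PySem.Int.floordiv_eq_ediv_of_pos (a := a + b) (b := 2) (by omega)
    omega
  · have h := PySem.Int.floordiv_two_mid_bounds (lo := a) (hi := b) (by omega)
    have := PySem.Int.floordiv_eq_ediv_of_pos (a := a + b) (b := 2) (by omega)
    omega

def szukaj_parzystej (stos_liczb : List Int) : Int :=
  let n : Int := stos_liczb.length
  let ab := szukaj_parzystej_loop stos_liczb 1 (n - 1)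
  (PySem.List.pyGet? stos_liczb ab.2).getD 0

-- ===== PORT B =====
-- Port of B's recursive helper idx(a, g): carries the left bound and the gap,
-- returns the final index; the list is indexed once, outside the recursion.
def szukaj_parzystej_idx (xs : List Int) (a g : Int) : Int :=
  if g ≤ 1 then a + g
  else
    let h := PySem.Int.floordiv g 2
    if PySem.Int.mod ((PySem.List.pyGet? xs (a + h)).getD 0) 2 == 0 then
      szukaj_parzystej_idx xs a h
    else
      szukaj_parzystej_idx xs (a + h) (g - h)
termination_by g.toNat
decreasing_by
  · have := PySem.Int.floordiv_eq_ediv_of_pos (a := g) (b := 2) (by omega)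
    omega
  · have := PySem.Int.floordiv_eq_ediv_of_pos (a := g) (b := 2) (by omega)
    omega

def szukaj_parzystej_alt (stos_liczb : List Int) : Int :=
  (PySem.List.pyGet? stos_liczb
      (szukaj_parzystej_idx stos_liczb 1 ((stos_liczb.length : Int) - 2))).getD 0

-- ===== PRECONDITION & SPEC =====
-- Pre_ excludes only the empty list, on which A raises IndexError (stos_liczb[-1]);
-- B raises IndexError there too.
def Pre_szukaj_parzystej (stos_liczb : List Int) : Prop := stos_liczb ≠ []
instance (stos_liczb : List Int) : Decidable (Pre_szukaj_parzystej stos_liczb) := by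
  unfold Pre_szukaj_parzystej; infer_instance

def pvWitness_szukaj_parzystej : List Int := [1, 3, 5, 2, 4]

def Spec_szukaj_parzystej (stos_liczb : List Int) (out : Int) : Prop := out = szukaj_parzystej_alt stos_liczb
instance (stos_liczb : List Int) (out : Int) : Decidable (Spec_szukaj_parzystej stos_liczb out) := by unfold Spec_szukaj_parzystej; infer_instance

-- ===== CLAIM (what is proved, stated in full; the proofs are below) =====
def Claim_equal_szukaj_parzystej : Prop := ∀ (stos_liczb : List Int), Dom_szukaj_parzystej stos_liczb → Pre_szukaj_parzystej stos_liczb → Spec_szukaj_parzystej stos_liczb (szukaj_parzystej stos_liczb)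

-- ===== LEMMAS AND PROOFS =====
-- The final right bound of A's loop from (a, b) is B's index from (a, b - a):
-- induction on a bound for the shrinking gap.
theorem loop_snd_eq_idx (xs : List Int) : ∀ (n : Nat) (a b : Int), (b - a).toNat ≤ n →
    (szukaj_parzystej_loop xs a b).2 = szukaj_parzystej_idx xs a (b - a) := by
  intro n
  induction n with
  | zero =>
    intro a b h
    have h1 : ¬ (b - a > 1) := by omega
    have h2 : b - a ≤ 1 := by omega
    rw [szukaj_parzystej_loop, szukaj_parzystej_idx, if_neg h1, if_pos h2]
    omega
  | succ n ih =>
    intro a b h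
    rw [szukaj_parzystej_loop, szukaj_parzystej_idx]
    by_cases hgt : b - a > 1
    · have hne : ¬ (b - a ≤ 1) := by omega
      rw [if_pos hgt, if_neg hne]
      have hs : PySem.Int.floordiv (a + b) 2 = a + PySem.Int.floordiv (b - a) 2 := by
        have h1 := PySem.Int.floordiv_eq_ediv_of_pos (a := a + b) (b := 2) (by omega)
        have h2 := PySem.Int.floordiv_eq_ediv_of_pos (a := b - a) (b := 2) (by omega)
        omega
      have hh := PySem.Int.floordiv_eq_ediv_of_pos (a := b - a) (b := 2) (by omega)
      simp only [hs]
      split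
      · have e1 : a + PySem.Int.floordiv (b - a) 2 - a = PySem.Int.floordiv (b - a) 2 := by ring
        rw [ih a (a + PySem.Int.floordiv (b - a) 2) (by omega), e1]
      · have e2 : b - (a + PySem.Int.floordiv (b - a) 2) = b - a - PySem.Int.floordiv (b - a) 2 := by
          ring
        rw [ih (a + PySem.Int.floordiv (b - a) 2) b (by omega), e2]
    · have h2 : b - a ≤ 1 := by omega
      rw [if_neg hgt, if_pos h2]
      omega

-- ===== VERDICT (by name: the statement is the Claim_ definition above) =====
theorem szukaj_parzystej_spec : Claim_equal_szukaj_parzystej := by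
  intro xs _ _
  unfold Spec_szukaj_parzystej szukaj_parzystej szukaj_parzystej_alt
  simp only
  rw [loop_snd_eq_idx xs ((xs.length : Int) - 1 - 1).toNat 1 ((xs.length : Int) - 1) le_rfl]
  have e : (xs.length : Int) - 1 - 1 = (xs.length : Int) - 2 := by ring
  rw [e]
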